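-- pv_equiv track=rewrite | github.com/RowanAJMarshall/OcGenerator | Utils/file_utilities.py | seperate_path_and_file
-- ===== SOURCE A (Python) =====
-- def seperate_path_and_file(filepath) -> (str, str):
--     slash_encountered = False
--     path = ""
--     filename = ""
--     for char in filepath[::-1]:
--         if char == "/":
--             slash_encountered = True
--             path += char
--         elif not slash_encountered:
--             filename += char
--         else:
--             path += char
--     return path[::-1], filename[::-1]
-- ===== SOURCE B (Python) =====
-- def seperate_path_and_file(filepath) -> (str, str):
--     idx = filepath.rfind("/")
--     return filepath[:idx + 1], filepath[idx + 1:]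
-- ===== Notes on version B (the rewrite author's own statement) =====
-- stated objective: idiomatic
-- what changed: Replaces the reverse-and-accumulate per-character loop with a single rfind for the last slash plus two slices; no reversal, no per-char branching, no quadratic string concatenation.
import Mathlib
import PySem

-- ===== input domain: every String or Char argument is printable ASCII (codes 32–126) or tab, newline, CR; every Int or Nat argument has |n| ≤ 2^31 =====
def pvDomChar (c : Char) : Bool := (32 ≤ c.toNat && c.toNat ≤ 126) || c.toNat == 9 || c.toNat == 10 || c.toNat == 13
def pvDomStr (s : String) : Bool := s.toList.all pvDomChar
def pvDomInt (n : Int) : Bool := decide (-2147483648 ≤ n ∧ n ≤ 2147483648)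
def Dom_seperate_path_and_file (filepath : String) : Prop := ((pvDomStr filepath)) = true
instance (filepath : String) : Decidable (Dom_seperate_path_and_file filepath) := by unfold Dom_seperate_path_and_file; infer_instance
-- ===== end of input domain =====

-- B replaces A's reverse-and-accumulate per-character loop with one rfind plus two slices (idiomatic).

-- ===== PORT A =====
-- loop body of A: reversed traversal, building `path`/`filename` by += (appended at the end)
def sepStep (st : Bool × List Char × List Char) (c : Char) : Bool × List Char × List Char :=
  if c = '/' then (true, st.2.1 ++ [c], st.2.2)
  else if st.1 = false then (st.1, st.2.1, st.2.2 ++ [c])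
  else (st.1, st.2.1 ++ [c], st.2.2)

def seperate_path_and_file (filepath : String) : String × String :=
  -- filepath[::-1] is reverse (PySem.Str.slice?_none_none_neg_one)
  let st := (filepath.toList.reverse).foldl sepStep (false, [], [])
  (String.ofList st.2.1.reverse, String.ofList st.2.2.reverse)

-- ===== PORT B =====
-- port of the library call str.rfind(c): highest index of c, or -1 if absent
def pyRfind (l : List Char) (c : Char) : Int :=
  if c ∈ l then (l.length : Int) - 1 - (l.reverse.idxOf c) else -1

def seperate_path_and_file_alt (filepath : String) : String × String :=
  let l := filepath.toList
  let idx := pyRfind l '/'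
  -- idx + 1 ≥ 0 always, so the Python slices s[:idx+1], s[idx+1:] are exactly take/drop
  (String.ofList (l.take (idx + 1).toNat), String.ofList (l.drop (idx + 1).toNat))

-- ===== PRECONDITION & SPEC =====
def Spec_seperate_path_and_file (filepath : String) (out : String × String) : Prop := out = seperate_path_and_file_alt filepath
instance (filepath : String) (out : String × String) : Decidable (Spec_seperate_path_and_file filepath out) := by unfold Spec_seperate_path_and_file; infer_instance

-- ===== CLAIM (what is proved, stated in full; the proofs are below) =====
def Claim_equal_seperate_path_and_file : Prop := ∀ (filepath : String), Dom_seperate_path_and_file filepath → Spec_seperate_path_and_file filepath (seperate_path_and_file filepath)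

-- ===== LEMMAS AND PROOFS =====

-- while no slash has been seen, every char is appended to `filename`
theorem foldl_no_slash (r : List Char) (h : '/' ∉ r) (p fn : List Char) :
    r.foldl sepStep (false, p, fn) = (false, p, fn ++ r) := by
  induction r generalizing fn with
  | nil => simp
  | cons c t ih =>
    have hc : c ≠ '/' := fun hc => h (hc ▸ List.mem_cons_self)
    have ht : '/' ∉ t := fun hm => h (List.mem_cons_of_mem _ hm)
    simp [sepStep, hc, ih ht]

-- once the flag is set, every remaining char is appended to `path`
theorem foldl_after_slash (r : List Char) (p fn : List Char) :
    r.foldl sepStep (true, p, fn) = (true, p ++ r, fn) := by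
  induction r generalizing p with
  | nil => simp
  | cons c t ih =>
    by_cases hc : c = '/' <;> simp [sepStep, hc, ih]

-- split a list at its first occurrence of a
theorem first_occ_split {a : Char} {r : List Char} (h : a ∈ r) :
    ∃ pre post, r = pre ++ a :: post ∧ a ∉ pre := by
  induction r with
  | nil => cases h
  | cons c t ih =>
    by_cases hc : c = a
    · exact ⟨[], t, by simp [hc], by simp⟩
    · have h' : a ∈ t := by
        rcases List.mem_cons.1 h with h1 | h1
        · exact absurd h1.symm hc
        · exact h1
      rcases ih h' with ⟨pre, post, hr, hpre⟩
      refine ⟨c :: pre, post, by simp [hr], ?_⟩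
      simp only [List.mem_cons, not_or]
      exact ⟨fun h2 => hc h2.symm, hpre⟩

theorem seperate_path_and_file_spec : Claim_equal_seperate_path_and_file := by
  intro filepath _
  unfold Spec_seperate_path_and_file seperate_path_and_file seperate_path_and_file_alt pyRfind
  dsimp only
  generalize filepath.toList = l
  by_cases h : '/' ∈ l
  · -- split the reversed list at the first slash from the end
    rcases first_occ_split (a := '/') (r := l.reverse) (by simpa using h) with ⟨pre, post, hr, hpre⟩
    have hlrep : l = (post.reverse ++ ['/']) ++ pre.reverse := by
      have := congrArg List.reverse hr
      simpa [List.reverse_append] using this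
    have hidx : l.reverse.idxOf '/' = pre.length := by
      rw [hr, List.idxOf_append_of_notMem hpre, List.idxOf_cons_self]; omega
    have hlen : l.length = post.length + 1 + pre.length := by
      have := congrArg List.length hr
      simpa [Nat.add_comm, Nat.add_left_comm] using this
    have htn : ((l.length : Int) - 1 - (l.reverse.idxOf '/' : Int) + 1).toNat
        = post.length + 1 := by
      rw [hidx]; omega
    rw [if_pos h, htn]
    have htake : l.take (post.length + 1) = post.reverse ++ ['/'] := by
      rw [hlrep, List.take_left' (by simp)]
    have hdrop : l.drop (post.length + 1) = pre.reverse := by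
      rw [hlrep, List.drop_left' (by simp)]
    rw [hr, List.foldl_append, foldl_no_slash pre hpre, List.foldl_cons]
    simp only [sepStep, if_true, List.nil_append]
    rw [foldl_after_slash]
    simp [htake, hdrop]
  · -- no slash: A puts everything in filename; rfind is -1, take 0 / drop 0
    rw [if_neg h, foldl_no_slash l.reverse (by simpa using h)]
    simp
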